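-- pv_equiv track=rewrite | github.com/ASSERT-KTH/C4B_APR | data_directory/1274_problem_id/39695_author_id/Rejected.py | dragons
-- ===== SOURCE A (Python) =====
-- def dragons(l):
--     n = l[4]
--     l = sorted(l[:4])
--     for i in range(3):
--         for j in range(i + 1, 4):
--             if l[i] != 0 and l[j] % l[i] == 0:
--                 l[j] = 0
--     l = [x for x in l if x != 0]
--     r = 0
--     for i in range(n):
--         for j in range(len(l)):
--             if i % l[j] == 0:
--                 r += 1
--                 break
--     return r
-- ===== SOURCE B (Python) =====
-- def _gcd(a, b):
--     if b == 0:
--         return a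
--     return _gcd(b, a % b)
--
--
-- def _solve(ds, n):
--     # inclusion-exclusion: |union of multiples of ds in [0,n)|
--     if not ds:
--         return 0
--     d = ds[0]
--     rest = ds[1:]
--     return ((n - 1) // d + 1) + _solve(rest, n) - _solve([d * e // _gcd(d, e) for e in rest], n)
--
--
-- def dragons(l):
--     n = l[4]
--     ds = []
--     for x in l[:4]:
--         a = -x if x < 0 else x
--         if a != 0 and a not in ds:
--             ds.append(a)
--     if n <= 0:
--         return 0
--     return _solve(ds, n)
-- ===== Notes on version B (the rewrite author's own statement) =====
-- stated objective: faster
-- what changed: replaces the O(n) scan over range(n) (and the quadratic divisor-elimination pass) by a recursive inclusion-exclusion over the distinct absolute divisors using lcm and floor-division counts, so the answer is computed in O(1) arithmetic steps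
import Mathlib
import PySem

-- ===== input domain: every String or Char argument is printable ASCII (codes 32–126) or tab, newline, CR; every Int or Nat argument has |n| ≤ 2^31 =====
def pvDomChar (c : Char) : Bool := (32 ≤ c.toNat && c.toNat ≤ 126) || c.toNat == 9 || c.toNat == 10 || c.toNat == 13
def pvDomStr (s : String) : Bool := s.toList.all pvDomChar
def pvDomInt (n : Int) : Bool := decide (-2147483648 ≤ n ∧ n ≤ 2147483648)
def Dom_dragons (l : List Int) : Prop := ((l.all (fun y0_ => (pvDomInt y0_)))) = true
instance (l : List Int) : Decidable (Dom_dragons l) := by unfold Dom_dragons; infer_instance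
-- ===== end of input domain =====

-- B replaces A's O(n) scan over range(n) (plus the pairwise divisor-elimination pass) by
-- recursive inclusion-exclusion over the distinct absolute divisors, using lcm and
-- floor-division counts: O(1) arithmetic steps instead of O(n).

-- ===== PORT A =====
-- inner counting loop `for j in range(len(l)): if i % l[j] == 0: r += 1; break`
def dragonsHit (ds : List Int) (i : Int) : Int :=
  match ds with
  | [] => 0
  | d :: t => if PySem.Int.mod i d = 0 then 1 else dragonsHit t i

-- body of the double elimination loop: `if l[i] != 0 and l[j] % l[i] == 0: l[j] = 0`
def dragonsStep (acc : List Int) (i j : Int) : List Int :=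
  if PySem.List.pyGetD acc i 0 ≠ 0 ∧
      PySem.Int.mod (PySem.List.pyGetD acc j 0) (PySem.List.pyGetD acc i 0) = 0
  then PySem.List.pySetD acc j 0 else acc

def dragons (l : List Int) : Int :=
  match PySem.List.pyGet? l 4 with
  | none => 0  -- IndexError: excluded by Pre_dragons
  | some n =>
    let s := PySem.List.sorted (PySem.List.slice l none (some 4)) id false
    let s2 := (PySem.List.pyRange 0 3 1).foldl (fun acc i =>
        (PySem.List.pyRange (i + 1) 4 1).foldl (fun acc2 j => dragonsStep acc2 i j) acc) s
    let ds := s2.filter (fun x => x != 0)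
    (PySem.List.pyRange 0 n 1).foldl (fun r i => r + dragonsHit ds i) 0

-- ===== PORT B =====
def dragonsGcd (a b : Int) : Int :=
  if h : b = 0 then a else dragonsGcd b (PySem.Int.mod a b)
termination_by b.natAbs
decreasing_by
  rcases lt_or_gt_of_ne h with hb | hb
  · have h1 := (PySem.Int.mod_neg_bounds a hb).1
    have h2 := (PySem.Int.mod_neg_bounds a hb).2
    omega
  · have h1 := PySem.Int.mod_nonneg a hb
    have h2 := PySem.Int.mod_lt a hb
    omega

def dragonsSolve (ds : List Int) (n : Int) : Int :=
  match ds with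
  | [] => 0
  | d :: rest =>
      (PySem.Int.floordiv (n - 1) d + 1) + dragonsSolve rest n
        - dragonsSolve (rest.map (fun e => PySem.Int.floordiv (d * e) (dragonsGcd d e))) n
termination_by ds.length
decreasing_by all_goals simp

-- body of the dedup loop collecting distinct absolute values
def dragonsAbsStep (acc : List Int) (x : Int) : List Int :=
  let a := if x < 0 then -x else x
  if a ≠ 0 ∧ a ∉ acc then acc ++ [a] else acc

def dragons_alt (l : List Int) : Int :=
  match PySem.List.pyGet? l 4 with
  | none => 0  -- IndexError: excluded by Pre_dragons
  | some n =>
    let ds := (PySem.List.slice l none (some 4)).foldl dragonsAbsStep []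
    if n ≤ 0 then 0 else dragonsSolve ds n

-- ===== PRECONDITION & SPEC =====
-- A raises IndexError reading the fifth element when the list has fewer than five elements.
def Pre_dragons (l : List Int) : Prop := 5 ≤ l.length
instance (l : List Int) : Decidable (Pre_dragons l) := by unfold Pre_dragons; infer_instance
def pvWitness_dragons : List Int := [2, 3, 4, 0, 10]

def Spec_dragons (l : List Int) (out : Int) : Prop := out = dragons_alt l
instance (l : List Int) (out : Int) : Decidable (Spec_dragons l out) := by unfold Spec_dragons; infer_instance

-- ===== CLAIM (what is proved, stated in full; the proofs are below) =====
def Claim_equal_dragons : Prop := ∀ (l : List Int), Dom_dragons l → Pre_dragons l → Spec_dragons l (dragons l)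

-- ===== LEMMAS AND PROOFS =====

-- "some nonzero member of xs divides m"
def MQ (xs : List Int) (m : Int) : Prop := ∃ x ∈ xs, x ≠ 0 ∧ x ∣ m

lemma MQ_congr {xs ys : List Int} (h : ∀ x, x ∈ xs ↔ x ∈ ys) (m : Int) : MQ xs m ↔ MQ ys m := by
  unfold MQ
  constructor
  · rintro ⟨x, hx, hx0, hdvd⟩; exact ⟨x, (h x).mp hx, hx0, hdvd⟩
  · rintro ⟨x, hx, hx0, hdvd⟩; exact ⟨x, (h x).mpr hx, hx0, hdvd⟩

lemma hit_eq (ds : List Int) (i : Int) :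
    dragonsHit ds i = if ∃ d ∈ ds, d ∣ i then 1 else 0 := by
  induction ds with
  | nil => simp [dragonsHit]
  | cons d t ih =>
    rw [dragonsHit, ih]
    by_cases hd : d ∣ i
    · simp [PySem.Int.mod_eq_zero_iff_dvd, hd]
    · simp only [PySem.Int.mod_eq_zero_iff_dvd]
      simp [hd]

lemma stepMQ (acc : List Int) (i j : Int) (h0 : 0 ≤ i) (h1 : 0 ≤ j) (hne : i ≠ j) (m : Int) :
    MQ (dragonsStep acc i j) m ↔ MQ acc m := by
  unfold dragonsStep
  split_ifs with hc
  · obtain ⟨hgi, hgj⟩ := hc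
    rw [PySem.Int.mod_eq_zero_iff_dvd] at hgj
    by_cases hjlen : j < (acc.length : Int)
    · have hilen : i < (acc.length : Int) := by
        by_contra hge
        rw [PySem.List.pyGetD_of_none acc i 0
          ((PySem.List.pyGet?_eq_none_iff acc i).mpr
            (by simp [PySem.Raise.InRange]; omega))] at hgi
        exact hgi rfl
      rw [PySem.List.pyGetD_eq_getElem acc 0 h0 hilen] at hgi hgj
      rw [PySem.List.pyGetD_eq_getElem acc 0 h1 hjlen] at hgj
      rw [PySem.List.pySetD_of_nonneg acc 0 h1]
      constructor
      · rintro ⟨x, hx, hx0, hdvd⟩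
        rcases List.mem_or_eq_of_mem_set hx with hx' | hx'
        · exact ⟨x, hx', hx0, hdvd⟩
        · exact absurd hx' hx0
      · rintro ⟨x, hx, hx0, hdvd⟩
        obtain ⟨k, hk, hkx⟩ := List.mem_iff_getElem.mp hx
        by_cases hkj : k = j.toNat
        · subst hkj
          refine ⟨acc[i.toNat], ?_, hgi, dvd_trans (hkx ▸ hgj) hdvd⟩
          refine List.mem_iff_getElem.mpr ⟨i.toNat, by simp; omega, ?_⟩
          exact List.getElem_set_ne (by omega) _
        · refine ⟨x, List.mem_iff_getElem.mpr ⟨k, by simpa using hk, ?_⟩, hx0, hdvd⟩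
          rw [List.getElem_set_ne (by omega)]; exact hkx
    · rw [PySem.List.pySetD_of_nonneg acc 0 h1,
        List.set_eq_of_length_le (by omega)]
  · exact Iff.rfl

lemma loopMQ (s : List Int) (m : Int) :
    MQ ((PySem.List.pyRange 0 3 1).foldl (fun acc i =>
        (PySem.List.pyRange (i + 1) 4 1).foldl (fun acc2 j => dragonsStep acc2 i j) acc) s) m
      ↔ MQ s m := by
  rw [show PySem.List.pyRange 0 3 1 = [0, 1, 2] from by decide]
  simp only [List.foldl_cons, List.foldl_nil]
  rw [show PySem.List.pyRange (0 + 1) 4 1 = [1, 2, 3] from by decide,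
    show PySem.List.pyRange (1 + 1) 4 1 = [2, 3] from by decide,
    show PySem.List.pyRange (2 + 1) 4 1 = [3] from by decide]
  simp only [List.foldl_cons, List.foldl_nil]
  rw [stepMQ _ 2 3 (by decide) (by decide) (by decide),
    stepMQ _ 1 3 (by decide) (by decide) (by decide),
    stepMQ _ 1 2 (by decide) (by decide) (by decide),
    stepMQ _ 0 3 (by decide) (by decide) (by decide),
    stepMQ _ 0 2 (by decide) (by decide) (by decide),
    stepMQ _ 0 1 (by decide) (by decide) (by decide)]

lemma absFold_mem (xs : List Int) (acc : List Int) (y : Int) :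
    y ∈ xs.foldl dragonsAbsStep acc ↔ y ∈ acc ∨ ∃ x ∈ xs, x ≠ 0 ∧ y = |x| := by
  induction xs generalizing acc with
  | nil => simp
  | cons x t ih =>
    rw [List.foldl_cons, ih]
    have habs : (if x < 0 then -x else x) = |x| := by
      rcases abs_cases x with ⟨h, _⟩ | ⟨h, _⟩ <;> omega
    unfold dragonsAbsStep
    rw [habs]
    by_cases hx0 : x = 0
    · subst hx0
      simp
    · have hne : |x| ≠ 0 := by simpa using hx0
      by_cases hmem : |x| ∈ acc
      · rw [if_neg (by simp [hmem])]
        constructor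
        · rintro (h | ⟨z, hz, hz0, hzy⟩)
          · exact Or.inl h
          · exact Or.inr ⟨z, List.mem_cons_of_mem _ hz, hz0, hzy⟩
        · rintro (h | ⟨z, hz, hz0, hzy⟩)
          · exact Or.inl h
          · rcases List.mem_cons.mp hz with rfl | hz'
            · exact Or.inl (hzy ▸ hmem)
            · exact Or.inr ⟨z, hz', hz0, hzy⟩
      · rw [if_pos ⟨hne, hmem⟩]
        constructor
        · rintro (h | ⟨z, hz, hz0, hzy⟩)
          · rcases List.mem_append.mp h with h' | h'
            · exact Or.inl h'
            · exact Or.inr ⟨x, List.mem_cons_self .., hx0, by simpa using h'⟩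
          · exact Or.inr ⟨z, List.mem_cons_of_mem _ hz, hz0, hzy⟩
        · rintro (h | ⟨z, hz, hz0, hzy⟩)
          · exact Or.inl (List.mem_append_left _ h)
          · rcases List.mem_cons.mp hz with rfl | hz'
            · exact Or.inl (List.mem_append_right _ (by simp [hzy]))
            · exact Or.inr ⟨z, hz', hz0, hzy⟩

lemma countP_or_and {α : Type} (l : List α) (p q : α → Bool) :
    l.countP (fun x => p x || q x) + l.countP (fun x => p x && q x)
      = l.countP p + l.countP q := by
  induction l with
  | nil => simp
  | cons a t ih =>
    simp only [List.countP_cons]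
    cases hp : p a <;> cases hq : q a <;> simp [hp, hq] <;> omega  

lemma cnt_mult (k : Nat) (hk : 0 < k) : ∀ N : Nat, 1 ≤ N →
    (List.range N).countP (fun i => decide (k ∣ i)) = (N - 1) / k + 1 := by
  intro N
  induction N with
  | zero => omega
  | succ M ih =>
    intro _
    rw [List.range_succ, List.countP_append]
    by_cases hM : M = 0
    · subst hM
      simp
    · rw [ih (by omega)]
      have hs : M / k = (M - 1) / k + if k ∣ M then 1 else 0 := by
        have := @Nat.succ_div (M - 1) k
        rw [show M - 1 + 1 = M from by omega] at this
        exact this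
      rw [Nat.add_sub_cancel]
      by_cases hd : k ∣ M
      · simp only [hd, if_true] at hs
        simp [hd, hs]
      · simp only [hd, if_false] at hs
        simp [hd, hs]

lemma gcd_emod (a b : Int) : Int.gcd b (a % b) = Int.gcd a b := by
  rw [show a % b = a + b * -(a / b) from by rw [Int.emod_def]; ring]
  rw [Int.gcd_add_mul_left_right b a (-(a / b))]
  exact Int.gcd_comm b a

lemma gcd_eq : ∀ (nb : Nat) (a b : Int), b.natAbs ≤ nb → 0 ≤ a → 0 ≤ b →
    dragonsGcd a b = Int.gcd a b := by
  intro nb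
  induction nb with
  | zero =>
    intro a b hnb ha hb
    have hb0 : b = 0 := by omega
    subst hb0
    rw [dragonsGcd, dif_pos rfl, Int.gcd_zero_right, Int.natAbs_of_nonneg ha]
  | succ M ih =>
    intro a b hnb ha hb
    by_cases hb0 : b = 0
    · subst hb0
      rw [dragonsGcd, dif_pos rfl, Int.gcd_zero_right, Int.natAbs_of_nonneg ha]
    · have hbpos : 0 < b := lt_of_le_of_ne hb (Ne.symm hb0)
      rw [dragonsGcd, dif_neg hb0, PySem.Int.mod_eq_emod_of_pos hbpos]
      have h1 : 0 ≤ a % b := Int.emod_nonneg a hb0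
      have h2 : a % b < b := Int.emod_lt_of_pos a hbpos
      rw [ih b (a % b) (by omega) hb h1, gcd_emod]

lemma lcm_val (d e : Int) (hd : 0 < d) (he : 0 < e) :
    PySem.Int.floordiv (d * e) (dragonsGcd d e) = Int.lcm d e := by
  rw [gcd_eq e.natAbs d e le_rfl hd.le he.le]
  have hg : 0 < Int.gcd d e := Int.gcd_pos_of_ne_zero_left e (by omega)
  rw [PySem.Int.floordiv_eq_ediv_of_pos (by exact_mod_cast hg)]
  have hde : d * e = ((d.natAbs * e.natAbs : Nat) : Int) := by
    push_cast
    rw [abs_of_pos hd, abs_of_pos he]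
  rw [hde, ← Int.gcd_mul_lcm d e, ← Int.natCast_div,
    Nat.mul_div_cancel_left _ hg]

lemma lcmDvdIff (d e : Int) (hd : 0 < d) (he : 0 < e) (i : Int) :
    ((Int.lcm d e : Int) ∣ i) ↔ d ∣ i ∧ e ∣ i := by
  constructor
  · intro h
    exact ⟨dvd_trans (Int.dvd_lcm_left d e) h, dvd_trans (Int.dvd_lcm_right d e) h⟩
  · rintro ⟨h1, h2⟩
    rw [Int.coe_lcm]
    exact lcm_dvd_iff.mpr ⟨h1, h2⟩

lemma dvd_cast_iff (d : Int) (hd : 0 < d) (i : Nat) : d ∣ (i : Int) ↔ d.toNat ∣ i := by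
  constructor
  · intro h
    have : (d.toNat : Int) ∣ (i : Int) := by rwa [Int.toNat_of_nonneg hd.le]
    exact_mod_cast this
  · intro h
    have : (d.toNat : Int) ∣ (i : Int) := Int.natCast_dvd_natCast.mpr h
    rwa [Int.toNat_of_nonneg hd.le] at this

lemma solve_eq (n : Int) (hn : 1 ≤ n) : ∀ (fuel : Nat) (ds : List Int), ds.length ≤ fuel →
    (∀ d ∈ ds, 0 < d) →
    dragonsSolve ds n
      = ((List.range n.toNat).countP (fun i : Nat => decide (∃ d ∈ ds, d ∣ (i : Int))) : Int) := by
  intro fuel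
  induction fuel with
  | zero =>
    intro ds hlen _
    have : ds = [] := List.eq_nil_of_length_eq_zero (by omega)
    subst this
    simp [dragonsSolve]
  | succ F ih =>
    intro ds hlen hpos
    match ds with
    | [] => simp [dragonsSolve]
    | d :: rest =>
      have hd : 0 < d := hpos d (List.mem_cons_self ..)
      have hrestpos : ∀ e ∈ rest, 0 < e := fun e he => hpos e (List.mem_cons_of_mem _ he)
      have hlen' : rest.length ≤ F := by simp at hlen; omega
      have hrest := ih rest hlen' hrestpos
      set mapped := rest.map (fun e => PySem.Int.floordiv (d * e) (dragonsGcd d e)) with hm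
      have hmappos : ∀ m ∈ mapped, 0 < m := by
        intro m hmem
        rw [hm] at hmem
        obtain ⟨e, he, rfl⟩ := List.mem_map.mp hmem
        have he' : 0 < e := hrestpos e he
        rw [lcm_val d e hd he']
        exact_mod_cast Nat.pos_of_ne_zero (Nat.lcm_ne_zero
          (by simpa using Int.natAbs_ne_zero.mpr (by omega : d ≠ 0))
          (by simpa using Int.natAbs_ne_zero.mpr (by omega : e ≠ 0)))
      have hmap := ih mapped (by rw [hm, List.length_map]; omega) hmappos
      rw [dragonsSolve, hrest, hmap]
      -- countP bookkeeping
      set N := n.toNat with hN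
      set p : Nat → Bool := fun i : Nat => decide (d ∣ (i : Int)) with hp
      set q : Nat → Bool := fun i : Nat => decide (∃ e ∈ rest, e ∣ (i : Int)) with hq
      have hcons : (List.range N).countP (fun i : Nat => decide (∃ x ∈ d :: rest, x ∣ (i : Int)))
          = (List.range N).countP (fun i => p i || q i) := by
        apply List.countP_congr
        intro x _
        simp [hp, hq]
      have hand : (List.range N).countP (fun i : Nat => decide (∃ m ∈ mapped, m ∣ (i : Int)))
          = (List.range N).countP (fun i => p i && q i) := by
        apply List.countP_congr
        intro x _
        simp only [hp, hq, hm, Bool.and_eq_true, decide_eq_true_eq, List.mem_map]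
        constructor
        · rintro ⟨mm, ⟨e, he, rfl⟩, hdvd⟩
          rw [lcm_val d e hd (hrestpos e he)] at hdvd
          obtain ⟨h1, h2⟩ := (lcmDvdIff d e hd (hrestpos e he) x).mp hdvd
          exact ⟨h1, e, he, h2⟩
        · rintro ⟨h1, e, he, h2⟩
          refine ⟨PySem.Int.floordiv (d * e) (dragonsGcd d e), ⟨e, he, rfl⟩, ?_⟩
          rw [lcm_val d e hd (hrestpos e he)]
          exact (lcmDvdIff d e hd (hrestpos e he) x).mpr ⟨h1, h2⟩
      have hcnt : (List.range N).countP p = (N - 1) / d.toNat + 1 := by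
        have := cnt_mult d.toNat (by omega) N (by omega)
        rw [← this]
        apply List.countP_congr
        intro x _
        simp [hp, dvd_cast_iff d hd x]
      have hfloor : PySem.Int.floordiv (n - 1) d + 1 = (((N - 1) / d.toNat + 1 : Nat) : Int) := by
        rw [PySem.Int.floordiv_eq_ediv_of_pos hd]
        have e1 : ((N - 1 : Nat) : Int) = n - 1 := by omega
        have e2 : ((d.toNat : Nat) : Int) = d := by omega
        conv_lhs => rw [← e1, ← e2]
        rw [← Int.natCast_div]
        push_cast
        ring
      have hkey := countP_or_and (List.range N) p q
      rw [hcons, hand, hfloor]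
      omega

lemma countA_eq (ds : List Int) (n : Int) :
    (PySem.List.pyRange 0 n 1).foldl (fun r i => r + dragonsHit ds i) 0
      = ((List.range n.toNat).countP (fun i : Nat => decide (∃ d ∈ ds, d ∣ (i : Int))) : Int) := by
  rw [PySem.List.pyRange_one, PySem.List.foldl_add]
  rw [show ((n : Int) - 0).toNat = n.toNat from by omega]
  induction (List.range n.toNat) with
  | nil => simp
  | cons a t ih =>
    simp only [List.map_cons, List.sum_cons, List.countP_cons, hit_eq, zero_add] at *
    by_cases h : ∃ d ∈ ds, d ∣ ((a : Int))
    · simp [h] at *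
      omega
    · simp [h] at *
      omega

-- ===== VERDICT (by name: the statement is the Claim_ definition above) =====
theorem dragons_spec : Claim_equal_dragons := by
  unfold Claim_equal_dragons
  intro l _hdom hPre
  unfold Pre_dragons at hPre
  unfold Spec_dragons dragons dragons_alt
  have h4 : 4 < l.length := by omega
  have hsome : PySem.List.pyGet? l 4 = some (l[4]'h4) := by
    have := PySem.List.pyGet?_ofNat (xs := l) (n := 4) h4
    simpa using this
  rw [hsome]
  simp only
  by_cases hn : l[4] ≤ 0
  · rw [if_pos hn, PySem.List.pyRange_one_eq_nil hn, List.foldl_nil]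
  · rw [if_neg hn]
    rw [countA_eq]
    have hposB : ∀ a ∈ (PySem.List.slice l none (some 4)).foldl dragonsAbsStep [], 0 < a := by
      intro a ha
      rcases (absFold_mem _ [] a).mp ha with h | ⟨x, _, hx0, rfl⟩
      · simp at h
      · exact abs_pos.mpr hx0
    rw [solve_eq l[4] (by omega) ((PySem.List.slice l none (some 4)).foldl dragonsAbsStep []).length
      ((PySem.List.slice l none (some 4)).foldl dragonsAbsStep []) le_rfl hposB]
    apply congrArg (fun k : Nat => (k : Int))
    apply List.countP_congr
    intro i _
    simp only [decide_eq_true_eq]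
    rw [show (∃ d ∈ (((PySem.List.pyRange 0 3 1).foldl (fun acc i =>
          (PySem.List.pyRange (i + 1) 4 1).foldl (fun acc2 j => dragonsStep acc2 i j) acc)
          (PySem.List.sorted (PySem.List.slice l none (some 4)) id false)).filter (fun x => x != 0)),
          d ∣ (i : Int)) ↔ MQ ((PySem.List.pyRange 0 3 1).foldl (fun acc i =>
          (PySem.List.pyRange (i + 1) 4 1).foldl (fun acc2 j => dragonsStep acc2 i j) acc)
          (PySem.List.sorted (PySem.List.slice l none (some 4)) id false)) (i : Int)
      from by
        simp only [List.mem_filter, bne_iff_ne, ne_eq]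
        unfold MQ
        constructor
        · rintro ⟨d, ⟨hm, h0⟩, hd⟩; exact ⟨d, hm, h0, hd⟩
        · rintro ⟨d, hm, h0, hd⟩; exact ⟨d, ⟨hm, h0⟩, hd⟩]
    rw [loopMQ]
    rw [MQ_congr (fun x => PySem.List.mem_sorted (PySem.List.slice l none (some 4)) id false x) (i : Int)]
    constructor
    · rintro ⟨x, hx, hx0, hdvd⟩
      exact ⟨|x|, (absFold_mem _ [] |x|).mpr (Or.inr ⟨x, hx, hx0, rfl⟩), (abs_dvd x (i : Int)).mpr hdvd⟩
    · rintro ⟨a, ha, hdvd⟩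
      rcases (absFold_mem _ [] a).mp ha with h | ⟨x, hx, hx0, rfl⟩
      · simp at h
      · exact ⟨x, hx, hx0, (abs_dvd x (i : Int)).mp hdvd⟩
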